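-- pv_equiv track=rewrite | github.com/lmironvish/Mathematical-methods-in-software-development | lab6/third.py | sum_shaded_elements
-- ===== SOURCE A (Python) =====
-- def sum_shaded_elements(matrix):
--     n = len(matrix)
--     total_sum = 0
--
--     for i in range(n):
--         for j in range(n):
--             if i != j and abs(i - j) == 1:  # Элементы на диагоналях, параллельных главной, но не на главной
--                 total_sum += matrix[i][j]
--
--     return total_sum
-- ===== SOURCE B (Python) =====
-- def sum_shaded_elements(matrix):
--     n = len(matrix)
--     total = 0
--     for i in range(n - 1):
--         total += matrix[i][i + 1] + matrix[i + 1][i]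
--     return total
-- ===== Notes on version B (the rewrite author's own statement) =====
-- stated objective: faster
-- what changed: Replaced the O(n^2) scan over all (i,j) pairs testing |i-j|==1 with a single O(n) pass that adds matrix[i][i+1] and matrix[i+1][i] directly.
import Mathlib
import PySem

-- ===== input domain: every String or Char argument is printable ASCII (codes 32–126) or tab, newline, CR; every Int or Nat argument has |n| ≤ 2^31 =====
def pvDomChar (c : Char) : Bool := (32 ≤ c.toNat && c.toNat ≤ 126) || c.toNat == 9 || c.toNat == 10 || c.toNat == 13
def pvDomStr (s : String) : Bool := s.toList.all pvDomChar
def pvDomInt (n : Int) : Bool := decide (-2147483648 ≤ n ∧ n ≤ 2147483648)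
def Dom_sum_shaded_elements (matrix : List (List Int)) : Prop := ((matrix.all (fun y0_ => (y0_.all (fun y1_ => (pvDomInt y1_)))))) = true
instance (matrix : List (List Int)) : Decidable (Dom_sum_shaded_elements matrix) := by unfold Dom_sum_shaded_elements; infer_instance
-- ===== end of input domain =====

-- B replaces A's O(n^2) scan of all index pairs by one direct O(n) pass over the two off-diagonals.

-- ===== PORT A =====
def sum_shaded_elements (matrix : List (List Int)) : Int :=
  let n : Int := matrix.length
  (PySem.List.pyRange 0 n 1).foldl (fun total i =>
    (PySem.List.pyRange 0 n 1).foldl (fun total j =>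
      if i ≠ j ∧ (i - j).natAbs = 1 then
        total + PySem.List.pyGetD (PySem.List.pyGetD matrix i []) j 0
      else total) total) 0

-- ===== PORT B =====
def sum_shaded_elements_alt (matrix : List (List Int)) : Int :=
  let n : Int := matrix.length
  (PySem.List.pyRange 0 (n - 1) 1).foldl (fun total i =>
    total + (PySem.List.pyGetD (PySem.List.pyGetD matrix i []) (i + 1) 0
             + PySem.List.pyGetD (PySem.List.pyGetD matrix (i + 1) []) i 0)) 0

-- ===== PRECONDITION & SPEC =====
-- Pre_ excludes exactly the ragged matrices on which Python A raises IndexError: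
-- A reads row i at column i+1 and row i+1 at column i for every i with i+1 < n.
def Pre_sum_shaded_elements (matrix : List (List Int)) : Prop :=
  ∀ i < matrix.length, (i + 1 < matrix.length →
    i + 1 < (matrix.getD i []).length ∧ i < (matrix.getD (i + 1) []).length)
instance (matrix : List (List Int)) : Decidable (Pre_sum_shaded_elements matrix) := by
  unfold Pre_sum_shaded_elements; infer_instance
def pvWitness_sum_shaded_elements : List (List Int) := [[1, 2], [3, 4]]

def Spec_sum_shaded_elements (matrix : List (List Int)) (out : Int) : Prop := out = sum_shaded_elements_alt matrix
instance (matrix : List (List Int)) (out : Int) : Decidable (Spec_sum_shaded_elements matrix out) := by unfold Spec_sum_shaded_elements; infer_instance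

-- ===== CLAIM (what is proved, stated in full; the proofs are below) =====
def Claim_equal_sum_shaded_elements : Prop := ∀ (matrix : List (List Int)), Dom_sum_shaded_elements matrix → Pre_sum_shaded_elements matrix → Spec_sum_shaded_elements matrix (sum_shaded_elements matrix)

-- ===== LEMMAS AND PROOFS =====

-- sum over range n of a single matched index
theorem pv_sum_single (v : Nat → Int) (k n : Nat) :
    ((List.range n).map (fun i => if i = k then v i else 0)).sum
      = if k < n then v k else 0 := by
  induction n with
  | zero => simp
  | succ n ih =>
    rw [List.range_succ]
    simp only [List.map_append, List.sum_append, List.map_cons, List.map_nil,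
      List.sum_cons, List.sum_nil, ih]
    by_cases h : k = n
    · subst h; simp
    · by_cases h2 : k < n <;> simp [h2] <;> omega

-- one column of A's condition, restricted to i < n ≤ m, matches the single index m-1
theorem pv_col (v : Nat → Int) (n m : Nat) (hm : n ≤ m) :
    ((List.range n).map (fun (i : Nat) =>
      if ¬ (i : Int) = (m : Int) ∧ ((i : Int) - (m : Int)).natAbs = 1 then v i else 0)).sum
    = if 0 < m ∧ m - 1 < n then v (m - 1) else 0 := by
  have hcong : ((List.range n).map (fun (i : Nat) =>
      if ¬ (i : Int) = (m : Int) ∧ ((i : Int) - (m : Int)).natAbs = 1 then v i else 0))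
      = ((List.range n).map (fun (i : Nat) => if i = m - 1 ∧ 0 < m then v i else 0)) := by
    refine List.map_congr_left ?_
    intro i hi
    simp only [List.mem_range] at hi
    split_ifs with h1 h2 h2 <;> first | rfl | (exfalso; omega)
  rw [hcong]
  by_cases hm0 : 0 < m
  · simp only [hm0, and_true, true_and]
    rw [pv_sum_single]
  · have hz : m = 0 := by omega
    subst hz; simp

-- one row of A's condition: same, with the fixed index on the left
theorem pv_row (v : Nat → Int) (n m : Nat) (hm : n ≤ m) :
    ((List.range n).map (fun (j : Nat) =>
      if ¬ (m : Int) = (j : Int) ∧ ((m : Int) - (j : Int)).natAbs = 1 then v j else 0)).sum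
    = if 0 < m ∧ m - 1 < n then v (m - 1) else 0 := by
  have hcong : ((List.range n).map (fun (j : Nat) =>
      if ¬ (m : Int) = (j : Int) ∧ ((m : Int) - (j : Int)).natAbs = 1 then v j else 0))
      = ((List.range n).map (fun (j : Nat) =>
        if ¬ (j : Int) = (m : Int) ∧ ((j : Int) - (m : Int)).natAbs = 1 then v j else 0)) := by
    refine List.map_congr_left ?_
    intro j hj
    simp only [List.mem_range] at hj
    split_ifs with h1 h2 h2 <;> first | rfl | (exfalso; omega)
  rw [hcong, pv_col v n m hm]

-- the combinatorial core: the double sum over the |i-j|=1 condition equals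
-- the single sum over the two off-diagonals
theorem pv_key (e : Nat → Nat → Int) (n : Nat) :
    ((List.range n).map (fun (i : Nat) =>
      ((List.range n).map (fun (j : Nat) =>
        if ¬ (i : Int) = (j : Int) ∧ ((i : Int) - (j : Int)).natAbs = 1 then e i j else 0)).sum)).sum
    = ((List.range (n - 1)).map (fun k => e k (k + 1) + e (k + 1) k)).sum := by
  induction n with
  | zero => simp
  | succ n ih =>
    -- split both the outer and the inner range at n
    rw [List.range_succ]
    simp only [List.map_append, List.map_cons, List.map_nil, List.sum_append,
      List.sum_cons, List.sum_nil, add_zero, not_true, false_and, if_false]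
    have hsplit : ((List.range n).map (fun (i : Nat) =>
        ((List.range n).map (fun (j : Nat) =>
          if ¬ (i : Int) = (j : Int) ∧ ((i : Int) - (j : Int)).natAbs = 1 then e i j else 0)).sum
        + (if ¬ (i : Int) = (n : Int) ∧ ((i : Int) - (n : Int)).natAbs = 1 then e i n else 0))).sum
        = ((List.range n).map (fun (i : Nat) =>
            ((List.range n).map (fun (j : Nat) =>
              if ¬ (i : Int) = (j : Int) ∧ ((i : Int) - (j : Int)).natAbs = 1 then e i j else 0)).sum)).sum
          + ((List.range n).map (fun (i : Nat) =>
              if ¬ (i : Int) = (n : Int) ∧ ((i : Int) - (n : Int)).natAbs = 1 then e i n else 0)).sum :=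
      PySem.List.sum_map_add_int _ _ _
    rw [hsplit, ih, pv_col (fun i => e i n) n n le_rfl,
        pv_row (fun j => e n j) n n le_rfl]
    -- close the arithmetic, by cases on whether the new row/column exist
    by_cases hn : n = 0
    · subst hn; simp
    · obtain ⟨m, rfl⟩ := Nat.exists_eq_succ_of_ne_zero hn
      have h1 : 0 < m + 1 ∧ m + 1 - 1 < m + 1 := by omega
      simp only [Nat.succ_eq_add_one] at *
      rw [if_pos h1, if_pos h1, Nat.add_sub_cancel, Nat.add_sub_cancel, List.range_succ]
      simp only [List.map_append, List.map_cons, List.map_nil, List.sum_append,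
        List.sum_cons, List.sum_nil, add_zero]
      ring

-- a loop that adds f x each step is init + the sum of the mapped list
theorem pv_fold_sum {α : Type} (l : List α) (F : Int → α → Int) (f : α → Int) (t : Int)
    (h : ∀ (acc : Int), ∀ x ∈ l, F acc x = acc + f x) :
    l.foldl F t = t + (l.map f).sum := by
  induction l generalizing t with
  | nil => simp
  | cons x xs ih =>
    simp only [List.foldl_cons, List.map_cons, List.sum_cons]
    rw [h t x (List.mem_cons_self), ih _ (fun acc y hy => h acc y (List.mem_cons_of_mem _ hy))]
    ring

-- bridge: port A as a double list-range sum
theorem pv_A_sum (matrix : List (List Int)) :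
    sum_shaded_elements matrix
      = ((List.range matrix.length).map (fun (i : Nat) =>
          ((List.range matrix.length).map (fun (j : Nat) =>
            if ¬ (i : Int) = (j : Int) ∧ ((i : Int) - (j : Int)).natAbs = 1 then
              (matrix.getD i []).getD j 0 else 0)).sum)).sum := by
  unfold sum_shaded_elements
  dsimp only
  rw [PySem.List.pyRange_zero_nat, List.foldl_map]
  rw [pv_fold_sum (List.range matrix.length) _
    (fun (i : Nat) => ((List.range matrix.length).map (fun (j : Nat) =>
      if ¬ (i : Int) = (j : Int) ∧ ((i : Int) - (j : Int)).natAbs = 1 then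
        (matrix.getD i []).getD j 0 else 0)).sum) 0
    (by
      intro acc i _
      rw [List.foldl_map]
      rw [pv_fold_sum (List.range matrix.length) _
        (fun (j : Nat) => if ¬ (i : Int) = (j : Int) ∧ ((i : Int) - (j : Int)).natAbs = 1 then
          (matrix.getD i []).getD j 0 else 0) acc
        (by
          intro t j _
          simp only [PySem.List.pyGetD_natCast, ne_eq]
          split_ifs <;> simp)])]
  simp

-- bridge: port B as a single list-range sum
theorem pv_B_sum (matrix : List (List Int)) :
    sum_shaded_elements_alt matrix
      = ((List.range (matrix.length - 1)).map (fun (k : Nat) =>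
          (matrix.getD k []).getD (k + 1) 0 + (matrix.getD (k + 1) []).getD k 0)).sum := by
  unfold sum_shaded_elements_alt
  dsimp only
  have hn : ((matrix.length : Int) - 1 - 0).toNat = matrix.length - 1 := by omega
  have hr : PySem.List.pyRange 0 ((matrix.length : Int) - 1) 1
      = (List.range (matrix.length - 1)).map (fun (k : Nat) => (k : Int)) := by
    rw [PySem.List.pyRange_one, hn]
    exact List.map_congr_left (fun k _ => by simp)
  rw [hr, List.foldl_map]
  rw [pv_fold_sum (List.range (matrix.length - 1)) _
    (fun (k : Nat) => (matrix.getD k []).getD (k + 1) 0 + (matrix.getD (k + 1) []).getD k 0) 0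
    (by
      intro acc k _
      have h1 : ((k : Int) + 1) = ((k + 1 : Nat) : Int) := by push_cast; ring
      rw [h1]
      simp only [PySem.List.pyGetD_natCast])]
  simp

-- ===== VERDICT (by name: the statement is the Claim_ definition above) =====
theorem sum_shaded_elements_spec : Claim_equal_sum_shaded_elements := by
  intro matrix _ _
  unfold Spec_sum_shaded_elements
  rw [pv_A_sum, pv_B_sum, pv_key]
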